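-- pv_equiv track=rewrite | github.com/CreepySenseiCode/Nexa | app/utils/formatters.py | formater_prenom
-- ===== SOURCE A (Python) =====
-- def formater_prenom(prenom: str) -> str:
--     """Met en majuscule la première lettre de chaque partie du prénom.
--
--     Gère correctement les prénoms composés avec tiret (ex: "jean-pierre"
--     devient "Jean-Pierre") et les espaces multiples.
--
--     Args:
--         prenom: Le prénom à formater.
--
--     Returns:
--         Le prénom formaté avec les initiales en majuscules.
--     """
--     if not prenom or not isinstance(prenom, str):
--         return ""
--
--     prenom = prenom.strip()
--
--     # Traitement des parties séparées par des espaces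
--     parties_espace = prenom.split()
--     resultats = []
--
--     for partie in parties_espace:
--         # Traitement des parties séparées par des tirets
--         sous_parties = partie.split('-')
--         partie_formatee = '-'.join(
--             sous_partie.capitalize() for sous_partie in sous_parties
--         )
--         resultats.append(partie_formatee)
--
--     return ' '.join(resultats)
-- ===== SOURCE B (Python) =====
-- def formater_prenom(prenom: str) -> str:
--     """Single character-by-character pass: an output buffer, a 'new_word' flag
--     (True at start and after any separator) and a 'pending' flag for whitespace
--     runs, instead of split/capitalize/join."""
--     if not prenom or not isinstance(prenom, str):
--         return ""
--
--     out = []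
--     new_word = True
--     pending = False
--     for c in prenom:
--         if c.isspace():
--             new_word = True
--             pending = True
--         elif c == '-':
--             if pending and out:
--                 out.append(' ')
--             out.append('-')
--             new_word = True
--             pending = False
--         else:
--             if pending and out:
--                 out.append(' ')
--             out.append(c.upper() if new_word else c.lower())
--             new_word = False
--             pending = False
--     return ''.join(out)
-- ===== Notes on version B (the rewrite author's own statement) =====
-- stated objective: alternative
-- what changed: Replaces A's strip/split/capitalize/join pipeline by a single character-by-character scan with an output buffer, a new-word flag and a pending-whitespace flag.
import Mathlib
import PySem

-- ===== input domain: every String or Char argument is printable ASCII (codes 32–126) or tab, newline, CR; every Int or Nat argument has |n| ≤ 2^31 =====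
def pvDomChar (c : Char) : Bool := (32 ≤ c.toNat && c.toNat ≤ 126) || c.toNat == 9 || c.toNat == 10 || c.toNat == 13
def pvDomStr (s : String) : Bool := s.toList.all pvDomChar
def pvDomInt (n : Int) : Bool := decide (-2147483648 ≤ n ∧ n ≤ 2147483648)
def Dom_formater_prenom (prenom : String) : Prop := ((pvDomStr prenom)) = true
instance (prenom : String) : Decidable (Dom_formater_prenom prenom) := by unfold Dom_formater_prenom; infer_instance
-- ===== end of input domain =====

-- B replaces A's strip/split/capitalize/join pipeline by a single character-by-character
-- pass with an output buffer, a new-word flag and a pending-whitespace flag (objective: alternative).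

-- ===== PORT A =====
-- str.capitalize(): first char uppercased, rest lowercased (exact on the ASCII domain)
def pvCap (cs : List Char) : List Char :=
  match cs with
  | [] => []
  | c :: r => PySem.Chars.upperChar c :: PySem.Chars.lower r

def formater_prenom (prenom : String) : String :=
  if prenom = "" then ""
  else
    let p := PySem.Chars.strip prenom.toList
    let parties := PySem.Chars.split₀ p
    let resultats := parties.map (fun partie =>
      PySem.Chars.join ['-'] ((PySem.Chars.splitOn partie ['-']).map pvCap))
    String.ofList (PySem.Chars.join [' '] resultats)

-- ===== PORT B =====
def pvStepB (st : List Char × Bool × Bool) (c : Char) : List Char × Bool × Bool :=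
  let out := st.1
  let nw := st.2.1
  let pend := st.2.2
  if PySem.Chars.isspace c then (out, true, true)
  else if c = '-' then
    ((if pend ∧ out ≠ [] then out ++ [' '] else out) ++ ['-'], true, false)
  else
    ((if pend ∧ out ≠ [] then out ++ [' '] else out) ++
      [if nw then PySem.Chars.upperChar c else PySem.Chars.lowerChar c], false, false)

def formater_prenom_alt (prenom : String) : String :=
  if prenom = "" then ""
  else String.ofList (prenom.toList.foldl pvStepB ([], true, false)).1

-- ===== PRECONDITION & SPEC =====
def Spec_formater_prenom (prenom : String) (out : String) : Prop := out = formater_prenom_alt prenom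
instance (prenom : String) (out : String) : Decidable (Spec_formater_prenom prenom out) := by unfold Spec_formater_prenom; infer_instance

-- ===== CLAIM (what is proved, stated in full; the proofs are below) =====
def Claim_equal_formater_prenom : Prop := ∀ (prenom : String), Dom_formater_prenom prenom → Spec_formater_prenom prenom (formater_prenom prenom)

-- ===== LEMMAS AND PROOFS =====

-- the capitalisation scan: new-word flag resets after '-'
def pvF (nw : Bool) : List Char → List Char
  | [] => []
  | c :: r =>
    if c = '-' then '-' :: pvF true r
    else (if nw then PySem.Chars.upperChar c else PySem.Chars.lowerChar c) :: pvF false r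

-- flag value after processing a chunk
def pvFlag (nw : Bool) : List Char → Bool
  | [] => nw
  | c :: r => pvFlag (decide (c = '-')) r

-- str.split() as a direct recursion (cur = reversed current word)
def pvWords : List Char → List Char → List (List Char)
  | [], cur => if cur = [] then [] else [cur.reverse]
  | c :: r, cur =>
    if PySem.Chars.isspace c then
      (if cur = [] then [] else [cur.reverse]) ++ pvWords r []
    else pvWords r (c :: cur)

-- split('-') as a direct recursion
def pvSplitDash : List Char → List (List Char)
  | [] => [[]]
  | c :: r => if c = '-' then [] :: pvSplitDash r else (pvSplitDash r).modifyHead (c :: ·)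

def pvJ (ws : List (List Char)) : List Char := PySem.Chars.join [' '] (ws.map (pvF true))

lemma pvSplitDash_ne_nil (l : List Char) : pvSplitDash l ≠ [] := by
  induction l with
  | nil => simp [pvSplitDash]
  | cons c r ih =>
    simp only [pvSplitDash]
    split
    · simp
    · cases h : pvSplitDash r with
      | nil => exact absurd h ih
      | cons p ps => simp [List.modifyHead]

lemma join_cons (d : List Char) (a : List Char) (l : List (List Char)) :
    PySem.Chars.join d (a :: l) = a ++ (if l = [] then [] else d ++ PySem.Chars.join d l) := by
  cases l with
  | nil => simp [PySem.Chars.join, List.intercalate]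
  | cons b t => simp [PySem.Chars.join, List.intercalate, List.intersperse]

lemma pvF_append (nw : Bool) (xs ys : List Char) :
    pvF nw (xs ++ ys) = pvF nw xs ++ pvF (pvFlag nw xs) ys := by
  induction xs generalizing nw with
  | nil => simp [pvF, pvFlag]
  | cons c r ih =>
    by_cases h : c = '-'
    · simp [pvF, pvFlag, h, ih]
    · simp [pvF, pvFlag, h, ih]

lemma pvFlag_append (nw : Bool) (xs ys : List Char) :
    pvFlag nw (xs ++ ys) = pvFlag (pvFlag nw xs) ys := by
  induction xs generalizing nw with
  | nil => simp [pvFlag]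
  | cons c r ih => simp [pvFlag, ih]

lemma pvF_ne_nil (w : List Char) (h : w ≠ []) : pvF true w ≠ [] := by
  cases w with
  | nil => exact absurd rfl h
  | cons c r =>
    simp only [pvF]
    split <;> simp

lemma splitOn_go_eq (l : List Char) : ∀ (fuel : Nat), l.length < fuel → ∀ cur acc,
    PySem.Chars.splitOn.go ['-'] fuel l cur acc
      = acc.reverse ++ (pvSplitDash l).modifyHead (cur.reverse ++ ·) := by
  induction l with
  | nil =>
    intro fuel hf cur acc
    obtain ⟨n, rfl⟩ : ∃ n, fuel = n + 1 := ⟨fuel - 1, by omega⟩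
    simp [PySem.Chars.splitOn.go, pvSplitDash, List.modifyHead]
  | cons c r ih =>
    intro fuel hf cur acc
    obtain ⟨n, rfl⟩ : ∃ n, fuel = n + 1 := ⟨fuel - 1, by omega⟩
    by_cases h : c = '-'
    · subst h
      have hpre : List.isPrefixOf ['-'] ('-' :: r) = true := by
        simp [List.isPrefixOf]
      rw [PySem.Chars.splitOn.go]
      simp only [hpre, if_pos, List.length_cons, List.length_nil, List.drop_succ_cons, List.drop_zero]
      rw [ih n (by simpa using hf) [] (cur.reverse :: acc)]
      cases hsd : pvSplitDash r with
      | nil => exact absurd hsd (pvSplitDash_ne_nil r)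
      | cons p ps => simp [pvSplitDash, hsd, List.modifyHead]
    · have hpre : List.isPrefixOf ['-'] (c :: r) = false := by
        simp only [List.isPrefixOf, Bool.and_eq_false_iff, beq_eq_false_iff_ne, ne_eq]
        exact Or.inl fun hh => h hh.symm
      rw [PySem.Chars.splitOn.go]
      simp only [hpre, Bool.false_eq_true, if_neg, not_false_iff]
      rw [ih n (by simpa using hf) (c :: cur) acc]
      cases hsd : pvSplitDash r with
      | nil => exact absurd hsd (pvSplitDash_ne_nil r)
      | cons p ps => simp [pvSplitDash, hsd, h, List.modifyHead]

lemma splitOn_dash_eq (w : List Char) : PySem.Chars.splitOn w ['-'] = pvSplitDash w := by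
  rw [PySem.Chars.splitOn, splitOn_go_eq w (w.length + 1) (by omega) [] []]
  cases hsd : pvSplitDash w with
  | nil => exact absurd hsd (pvSplitDash_ne_nil w)
  | cons p ps => simp [List.modifyHead]

lemma cap_join_eq (r : List Char) : ∀ p ps, pvSplitDash r = p :: ps →
    PySem.Chars.join ['-'] (pvCap p :: ps.map pvCap) = pvF true r ∧
    PySem.Chars.join ['-'] (PySem.Chars.lower p :: ps.map pvCap) = pvF false r := by
  induction r with
  | nil =>
    intro p ps h
    simp only [pvSplitDash] at h
    cases h
    simp [pvCap, pvF, join_cons, PySem.Chars.lower]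
  | cons c r ih =>
    intro p ps h
    by_cases hc : c = '-'
    · subst hc
      simp only [pvSplitDash, if_pos] at h
      cases hsd : pvSplitDash r with
      | nil => exact absurd hsd (pvSplitDash_ne_nil r)
      | cons q qs =>
        rw [hsd] at h
        cases h
        have h1 := (ih q qs hsd).1
        constructor <;>
          · simp only [pvCap, PySem.Chars.lower, List.map_nil, pvF]
            rw [join_cons, if_neg (by simp)]
            simp [h1]
    · simp only [pvSplitDash, hc, if_neg, not_false_iff] at h
      cases hsd : pvSplitDash r with
      | nil => exact absurd hsd (pvSplitDash_ne_nil r)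
      | cons q qs =>
        rw [hsd] at h
        simp only [List.modifyHead] at h
        injection h with hp hps
        subst hp; subst hps
        obtain ⟨h1, h2⟩ := ih q qs hsd
        rw [join_cons] at h2
        constructor
        · simp only [pvCap, pvF, if_neg hc, PySem.Chars.lower]
          rw [join_cons, ← h2]
          simp [PySem.Chars.lower]
        · simp only [pvF, if_neg hc, PySem.Chars.lower]
          rw [join_cons, ← h2]
          simp [PySem.Chars.lower]

lemma fmtWord_eq (w : List Char) :
    PySem.Chars.join ['-'] ((PySem.Chars.splitOn w ['-']).map pvCap) = pvF true w := by
  rw [splitOn_dash_eq]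
  cases hsd : pvSplitDash w with
  | nil => exact absurd hsd (pvSplitDash_ne_nil w)
  | cons p ps => simpa using (cap_join_eq w p ps hsd).1

lemma split₀_go_eq (cs : List Char) : ∀ cur acc,
    PySem.Chars.split₀.go cs cur acc = acc.reverse ++ pvWords cs cur := by
  induction cs with
  | nil =>
    intro cur acc
    by_cases h : cur = [] <;> simp [PySem.Chars.split₀.go, pvWords, h, List.isEmpty_iff]
  | cons c r ih =>
    intro cur acc
    by_cases hs : PySem.Chars.isspace c
    · by_cases h : cur = []
      · simp [PySem.Chars.split₀.go, pvWords, hs, h, ih]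
      · simp [PySem.Chars.split₀.go, pvWords, hs, h, List.isEmpty_iff, ih]
    · simp [PySem.Chars.split₀.go, pvWords, hs, ih]

lemma split₀_eq (cs : List Char) : PySem.Chars.split₀ cs = pvWords cs [] := by
  rw [PySem.Chars.split₀, split₀_go_eq]; rfl

lemma pvWords_ne_nil (cs : List Char) : ∀ cur, cur ≠ [] → pvWords cs cur ≠ [] := by
  induction cs with
  | nil => intro cur h; simp [pvWords, h]
  | cons c r ih =>
    intro cur h
    by_cases hs : PySem.Chars.isspace c
    · simp [pvWords, hs, h]
    · simpa [pvWords, hs] using ih (c :: cur) (by simp)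

lemma pvWords_lstrip (cs : List Char) :
    pvWords (List.dropWhile PySem.Chars.isspace cs) [] = pvWords cs [] := by
  induction cs with
  | nil => rfl
  | cons c r ih =>
    by_cases hs : PySem.Chars.isspace c
    · simpa [List.dropWhile, hs, pvWords] using ih
    · simp [List.dropWhile, hs]

lemma pvWords_trailing (xs : List Char) : ∀ ws cur, (∀ c ∈ ws, PySem.Chars.isspace c) →
    pvWords (xs ++ ws) cur = pvWords xs cur := by
  induction xs with
  | nil =>
    intro ws cur hws
    induction ws generalizing cur with
    | nil => simp
    | cons w t iht =>
      have hw : PySem.Chars.isspace w := hws w (by simp)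
      by_cases h : cur = []
      · simp only [List.nil_append, pvWords, hw, if_pos, h]
        simpa using iht [] (fun c hc => hws c (by simp [hc]))
      · simp only [List.nil_append, pvWords, hw, if_pos, if_neg h]
        have := iht [] (fun c hc => hws c (by simp [hc]))
        simp only [List.nil_append] at this
        simp [this, pvWords]
  | cons x xs ih =>
    intro ws cur hws
    by_cases hs : PySem.Chars.isspace x <;>
      simp [pvWords, hs, ih ws _ hws]

lemma pvWords_strip (cs : List Char) :
    pvWords (PySem.Chars.strip cs) [] = pvWords cs [] := by
  rw [PySem.Chars.strip, PySem.Chars.lstrip, PySem.Chars.rstrip]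
  have hdecomp : List.dropWhile PySem.Chars.isspace cs
      = (List.dropWhile PySem.Chars.isspace (List.dropWhile PySem.Chars.isspace cs).reverse).reverse
        ++ (List.takeWhile PySem.Chars.isspace (List.dropWhile PySem.Chars.isspace cs).reverse).reverse := by
    rw [← List.reverse_append, List.takeWhile_append_dropWhile, List.reverse_reverse]
  calc pvWords (List.dropWhile PySem.Chars.isspace (List.dropWhile PySem.Chars.isspace cs).reverse).reverse []
      = pvWords (List.dropWhile PySem.Chars.isspace cs) [] := by
        conv_rhs => rw [hdecomp]
        rw [pvWords_trailing]
        intro c hc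
        rw [List.mem_reverse] at hc
        exact List.mem_takeWhile_imp hc
    _ = pvWords cs [] := pvWords_lstrip cs

lemma pvJ_cons (w : List Char) (ws : List (List Char)) :
    pvJ (w :: ws) = pvF true w ++ (if ws = [] then [] else ' ' :: pvJ ws) := by
  simp only [pvJ, List.map_cons]
  rw [join_cons]
  cases ws <;> simp

lemma grand (cs : List Char) :
    (∀ pend, (cs.foldl pvStepB ([], true, pend)).1 = pvJ (pvWords cs [])) ∧
    (∀ cur pref, cur ≠ [] →
      (cs.foldl pvStepB (pref ++ pvF true cur.reverse, pvFlag true cur.reverse, false)).1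
        = pref ++ pvJ (pvWords cs cur)) ∧
    (∀ pref, pref ≠ [] →
      (cs.foldl pvStepB (pref, true, true)).1
        = pref ++ (if pvWords cs [] = [] then [] else ' ' :: pvJ (pvWords cs []))) := by
  induction cs with
  | nil =>
    refine ⟨?_, ?_, ?_⟩
    · intro pend; simp [pvWords, pvJ, PySem.Chars.join, List.intercalate]
    · intro cur pref hcur
      simp [pvWords, hcur, pvJ_cons]
    · intro pref hpref
      simp [pvWords]
  | cons c cs ih =>
    obtain ⟨ihP, ihQ, ihR⟩ := ih
    refine ⟨?_, ?_, ?_⟩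
    · intro pend
      by_cases hs : PySem.Chars.isspace c
      · rw [List.foldl_cons, show pvStepB ([], true, pend) c = ([], true, true) from by
          simp [pvStepB, hs]]
        rw [ihP true]
        simp [pvWords, hs]
      · by_cases hc : c = '-'
        · subst hc
          rw [List.foldl_cons, show pvStepB ([], true, pend) '-' = (['-'], true, false) from by
            simp [pvStepB, hs]]
          have h1 := ihQ ['-'] [] (by simp)
          simp only [List.reverse_singleton, List.nil_append] at h1
          rw [show pvF true ['-'] = ['-'] from by simp [pvF],
            show pvFlag true ['-'] = true from by simp [pvFlag]] at h1
          rw [h1]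
          simp [pvWords, hs]
        · rw [List.foldl_cons, show pvStepB ([], true, pend) c
              = ([PySem.Chars.upperChar c], false, false) from by simp [pvStepB, hs, hc]]
          have h1 := ihQ [c] [] (by simp)
          simp only [List.reverse_singleton, List.nil_append] at h1
          rw [show pvF true [c] = [PySem.Chars.upperChar c] from by simp [pvF, hc],
            show pvFlag true [c] = false from by simp [pvFlag, hc]] at h1
          rw [h1]
          simp [pvWords, hs]
    · intro cur pref hcur
      have hout : pref ++ pvF true cur.reverse ≠ [] := by
        have := pvF_ne_nil cur.reverse (by simpa using hcur)
        intro h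
        rcases List.append_eq_nil_iff.1 h with ⟨-, h2⟩
        exact this h2
      by_cases hs : PySem.Chars.isspace c
      · rw [List.foldl_cons, show pvStepB (pref ++ pvF true cur.reverse, pvFlag true cur.reverse, false) c
            = (pref ++ pvF true cur.reverse, true, true) from by simp [pvStepB, hs]]
        rw [ihR _ hout]
        rw [show pvWords (c :: cs) cur = cur.reverse :: pvWords cs [] from by
          simp [pvWords, hs, hcur]]
        rw [pvJ_cons]
        by_cases hw : pvWords cs [] = [] <;> simp [hw]
      · by_cases hc : c = '-'
        · subst hc
          rw [List.foldl_cons, show pvStepB (pref ++ pvF true cur.reverse, pvFlag true cur.reverse, false) '-'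
              = (pref ++ pvF true cur.reverse ++ ['-'], true, false) from by simp [pvStepB, hs]]
          have h1 := ihQ ('-' :: cur) pref (by simp)
          rw [show ('-' :: cur).reverse = cur.reverse ++ ['-'] from by simp] at h1
          rw [pvF_append, pvFlag_append,
            show pvF (pvFlag true cur.reverse) ['-'] = ['-'] from by simp [pvF],
            show pvFlag (pvFlag true cur.reverse) ['-'] = true from by simp [pvFlag]] at h1
          rw [← List.append_assoc] at h1
          rw [h1]
          simp [pvWords, hs]
        · rw [List.foldl_cons, show pvStepB (pref ++ pvF true cur.reverse, pvFlag true cur.reverse, false) c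
              = (pref ++ pvF true cur.reverse
                  ++ [if pvFlag true cur.reverse then PySem.Chars.upperChar c else PySem.Chars.lowerChar c],
                 false, false) from by simp [pvStepB, hs, hc]]
          have h1 := ihQ (c :: cur) pref (by simp)
          rw [show (c :: cur).reverse = cur.reverse ++ [c] from by simp] at h1
          rw [pvF_append, pvFlag_append,
            show pvF (pvFlag true cur.reverse) [c]
                = [if pvFlag true cur.reverse then PySem.Chars.upperChar c else PySem.Chars.lowerChar c]
              from by simp [pvF, hc],
            show pvFlag (pvFlag true cur.reverse) [c] = false from by simp [pvFlag, hc]] at h1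
          rw [← List.append_assoc] at h1
          rw [h1]
          simp [pvWords, hs]
    · intro pref hpref
      by_cases hs : PySem.Chars.isspace c
      · rw [List.foldl_cons, show pvStepB (pref, true, true) c = (pref, true, true) from by
          simp [pvStepB, hs]]
        rw [ihR _ hpref]
        simp [pvWords, hs]
      · by_cases hc : c = '-'
        · subst hc
          rw [List.foldl_cons, show pvStepB (pref, true, true) '-'
              = (pref ++ [' '] ++ ['-'], true, false) from by simp [pvStepB, hs, hpref]]
          have h1 := ihQ ['-'] (pref ++ [' ']) (by simp)
          simp only [List.reverse_singleton] at h1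
          rw [show pvF true ['-'] = ['-'] from by simp [pvF],
            show pvFlag true ['-'] = true from by simp [pvFlag]] at h1
          rw [h1]
          rw [show pvWords ('-' :: cs) [] = pvWords cs ['-'] from by simp [pvWords, hs]]
          rw [if_neg (pvWords_ne_nil cs ['-'] (by simp))]
          simp
        · rw [List.foldl_cons, show pvStepB (pref, true, true) c
              = (pref ++ [' '] ++ [PySem.Chars.upperChar c], false, false) from by
                simp [pvStepB, hs, hc, hpref]]
          have h1 := ihQ [c] (pref ++ [' ']) (by simp)
          simp only [List.reverse_singleton] at h1
          rw [show pvF true [c] = [PySem.Chars.upperChar c] from by simp [pvF, hc],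
            show pvFlag true [c] = false from by simp [pvFlag, hc]] at h1
          rw [h1]
          rw [show pvWords (c :: cs) [] = pvWords cs [c] from by simp [pvWords, hs]]
          rw [if_neg (pvWords_ne_nil cs [c] (by simp))]
          simp

-- ===== VERDICT (by name: the statement is the Claim_ definition above) =====
theorem formater_prenom_spec : Claim_equal_formater_prenom := by
  intro prenom _
  unfold Spec_formater_prenom formater_prenom formater_prenom_alt
  by_cases h : prenom = ""
  · simp [h]
  · simp only [h, if_neg, not_false_iff]
    congr 1
    rw [split₀_eq, pvWords_strip]
    rw [List.map_congr_left (fun w _ => fmtWord_eq w)]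
    exact ((grand prenom.toList).1 false).symm
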